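-- pv_equiv track=rewrite | github.com/DenBugNBA/YandexAlgorithmsTrainings | 2. Linear search (1.0)/F_Symmetric_sequence.py | make_symmetric
-- ===== SOURCE A (Python) =====
-- def make_symmetric(arr):
--     n = len(arr)
--
--     count = 0
--
--     i = 0
--     while arr != arr[::-1]:
--         count += 1
--         arr.insert(n, arr[i])
--         i += 1
--
--     return count, arr[n:]
-- ===== SOURCE B (Python) =====
-- def make_symmetric(arr):
--     # Scan for the smallest k whose suffix arr[k:] is a palindrome (two-pointer
--     # check with early exit, no copies, no mutation); the answer is then k
--     # appended elements, namely arr[:k] reversed.  Unlike A, B does not mutate arr.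
--     n = len(arr)
--     k = 0
--     while True:
--         l, r = k, n - 1
--         while l < r and arr[l] == arr[r]:
--             l += 1
--             r -= 1
--         if l >= r:
--             return k, arr[:k][::-1]
--         k += 1
-- ===== Notes on version B (the rewrite author's own statement) =====
-- stated objective: faster
-- what changed: Instead of simulating the appends (repeatedly inserting a mirrored element into the list and comparing the whole growing list with its reversal), B scans for the smallest k whose suffix arr[k:] is a palindrome using an in-place two-pointer check with early exit, then returns (k, arr[:k][::-1]) directly; B also does not mutate its argument.
import Mathlib
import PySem

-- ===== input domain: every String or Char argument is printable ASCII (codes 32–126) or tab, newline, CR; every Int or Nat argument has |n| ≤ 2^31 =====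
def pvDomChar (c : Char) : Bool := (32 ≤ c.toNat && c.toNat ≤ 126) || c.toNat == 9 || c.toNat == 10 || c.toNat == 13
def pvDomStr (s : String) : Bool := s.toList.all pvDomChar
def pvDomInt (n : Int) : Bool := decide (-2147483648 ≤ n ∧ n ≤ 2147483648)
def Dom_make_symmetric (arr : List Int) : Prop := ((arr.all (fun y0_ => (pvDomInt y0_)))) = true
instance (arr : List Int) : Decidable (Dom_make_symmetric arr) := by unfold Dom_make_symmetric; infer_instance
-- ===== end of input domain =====

-- B replaces A's simulation (repeatedly inserting into and comparing a growing copy of the list)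
-- by a direct two-pointer scan for the smallest k with arr[k:] a palindrome; measurably faster.
-- A mutates its argument in place (appends the mirrored prefix); B does not — the equivalence
-- proved here is about the RETURN value only.

-- ===== PORT A =====
-- 'while arr != arr[::-1]' : arr[::-1] is arr.reverse (PySem.List.slice?_none_none_neg_one);
-- 'arr[n:]' is arr.drop n (PySem.List.slice_from_natCast); 'arr.insert(n, x)' is PySem.List.insert.
-- The loop body runs at most n-1 times (after n insertions arr = a ++ a.reverse, a palindrome),
-- so fuel n is provably sufficient: the fuel-0 branch and the IndexError (none) branch of arr[i]
-- are unreachable; they just return the current state.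
def pvAppendLoop (n : Nat) : Nat → List Int → Int → Int → Int × List Int
  | fuel, arr, count, i =>
    if arr = arr.reverse then (count, arr.drop n)
    else
      match fuel with
      | 0 => (count, arr.drop n)
      | fuel + 1 =>
        match PySem.List.pyGet? arr i with
        | none => (count, arr.drop n)
        | some x => pvAppendLoop n fuel (PySem.List.insert arr (n : Int) x) (count + 1) (i + 1)

def make_symmetric (arr : List Int) : Int × List Int :=
  pvAppendLoop arr.length arr.length arr 0 0

-- ===== PORT B =====
-- inner 'while l < r and arr[l] == arr[r]' loop of Source B, returned as the Bool 'l >= r' that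
-- Source B tests right after the loop; arr[l]/arr[r] with in-range Nat indices are a.getD _ 0
-- (= PySem.List.pyGetD via pyGetD_natCast).
def pvPalFrom (a : List Int) (l r : Nat) : Bool :=
  if l < r then
    if a.getD l 0 = a.getD r 0 then pvPalFrom a (l + 1) (r - 1) else false
  else true
termination_by r - l

-- outer 'while True' loop over k, with the same provably-sufficient fuel n as in A's port
-- ('arr[:k][::-1]' is (a.take k).reverse: PySem.List.slice_to_natCast, slice?_none_none_neg_one).
def pvScan (a : List Int) (n : Nat) : Nat → Nat → Int × List Int
  | fuel, k =>
    if pvPalFrom a k (n - 1) then ((k : Int), (a.take k).reverse)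
    else
      match fuel with
      | 0 => ((k : Int), (a.take k).reverse)
      | fuel + 1 => pvScan a n fuel (k + 1)

def make_symmetric_alt (arr : List Int) : Int × List Int :=
  pvScan arr arr.length arr.length 0

-- ===== PRECONDITION & SPEC =====
def Spec_make_symmetric (arr : List Int) (out : Int × List Int) : Prop := out = make_symmetric_alt arr
instance (arr : List Int) (out : Int × List Int) : Decidable (Spec_make_symmetric arr out) := by unfold Spec_make_symmetric; infer_instance

-- ===== CLAIM (what is proved, stated in full; the proofs are below) =====
def Claim_equal_make_symmetric : Prop := ∀ (arr : List Int), Dom_make_symmetric arr → Spec_make_symmetric arr (make_symmetric arr)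

-- ===== LEMMAS AND PROOFS =====

-- A's whole-list guard 'a ++ rev(a[:k]) is a palindrome' ↔ the suffix a[k:] is a palindrome
lemma guard_iff (a : List Int) (k : Nat) :
    (a ++ (a.take k).reverse = (a ++ (a.take k).reverse).reverse) ↔
      (a.drop k = (a.drop k).reverse) := by
  conv_lhs => rw [List.reverse_append, List.reverse_reverse,
    show a.reverse = (a.drop k).reverse ++ (a.take k).reverse by
      rw [← List.reverse_append, List.take_append_drop]]
  nth_rewrite 1 [← List.take_append_drop k a]
  rw [List.append_assoc]
  constructor
  · intro h
    exact List.append_cancel_right (List.append_cancel_left h)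
  · intro h
    rw [← h]

-- the segment a[l..r] (l < r ≤ len-1) decomposes as a[l] :: middle ++ [a[r]]
lemma seg_decomp (a : List Int) (l r : Nat) (hlr : l < r) (hr : r < a.length) :
    (a.drop l).take (r + 1 - l) =
      a[l] :: ((a.drop (l + 1)).take (r - 1 + 1 - (l + 1)) ++ [a[r]]) := by
  have hl : l < a.length := lt_trans hlr hr
  rw [List.drop_eq_getElem_cons hl]
  have h1 : r + 1 - l = (r - l - 1 + 1) + 1 := by omega
  rw [h1, List.take_succ_cons]
  congr 1
  have h2 : r - 1 + 1 - (l + 1) = r - l - 1 := by omega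
  rw [h2, List.take_add_one]
  congr 1
  rw [List.getElem?_drop]
  have : l + 1 + (r - l - 1) = r := by omega
  rw [this, List.getElem?_eq_getElem hr]
  rfl

lemma pal_cons_append (x z : Int) (ys : List Int) :
    (x :: (ys ++ [z]) = (x :: (ys ++ [z])).reverse) ↔ (x = z ∧ ys = ys.reverse) := by
  rw [List.reverse_cons, List.reverse_append]
  simp only [List.reverse_cons, List.reverse_nil, List.nil_append, List.cons_append]
  constructor
  · rintro h
    rw [List.cons_eq_cons] at h
    obtain ⟨hx, h2⟩ := h
    refine ⟨hx, ?_⟩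
    subst hx
    exact List.append_cancel_right h2
  · rintro ⟨hx, hy⟩
    subst hx
    rw [← hy]

lemma short_pal (s : List Int) (h : s.length ≤ 1) : s = s.reverse := by
  match s, h with
  | [], _ => rfl
  | [x], _ => rfl

-- the two-pointer check decides palindromicity of the segment a[l..r]
lemma pvPalFrom_eq (a : List Int) (l r : Nat) (hr : r < a.length) :
    pvPalFrom a l r =
      decide ((a.drop l).take (r + 1 - l) = ((a.drop l).take (r + 1 - l)).reverse) := by
  fun_induction pvPalFrom a l r with
  | case1 l r hlr heq ih =>
    have hl : l < a.length := lt_trans hlr hr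
    have heq' : a[l] = a[r] := by
      rwa [List.getD_eq_getElem a 0 hl, List.getD_eq_getElem a 0 hr] at heq
    rw [ih (by omega)]
    apply decide_eq_decide.mpr
    rw [seg_decomp a l r hlr hr, pal_cons_append]
    simp [heq']
  | case2 l r hlr hne =>
    have hl : l < a.length := lt_trans hlr hr
    have hne' : ¬ a[l] = a[r] := by
      rwa [List.getD_eq_getElem a 0 hl, List.getD_eq_getElem a 0 hr] at hne
    rw [show (false : Bool) = decide False by simp]
    apply decide_eq_decide.mpr
    rw [seg_decomp a l r hlr hr, pal_cons_append]
    simp [hne']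
  | case3 l r hlr =>
    have hlen : ((a.drop l).take (r + 1 - l)).length ≤ 1 := by
      simp [List.length_take, List.length_drop]; omega
    simp [← short_pal _ hlen]

-- the two loop guards agree
lemma guard_eq_pal (a : List Int) (k : Nat) (hk : k ≤ a.length) :
    (a ++ (a.take k).reverse = (a ++ (a.take k).reverse).reverse) ↔
      pvPalFrom a k (a.length - 1) = true := by
  rw [guard_iff]
  rcases Nat.eq_zero_or_pos a.length with h0 | hpos
  · have ha : a = [] := List.length_eq_zero_iff.mp h0
    subst ha
    have hk0 : k = 0 := by omega
    subst hk0
    simp [pvPalFrom]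
  · rw [pvPalFrom_eq a k (a.length - 1) (by omega)]
    have h1 : a.length - 1 + 1 - k = (a.drop k).length := by
      rw [List.length_drop]; omega
    rw [h1, List.take_length]
    simp

-- the two loops agree step by step: after k iterations A's list is a ++ rev(a[:k])
lemma loop_eq (a : List Int) :
    ∀ (fuel k : Nat), k ≤ a.length →
      pvAppendLoop a.length fuel (a ++ (a.take k).reverse) (k : Int) (k : Int) =
        pvScan a a.length fuel k := by
  intro fuel
  induction fuel with
  | zero =>
    intro k hk
    rw [pvAppendLoop, pvScan]
    by_cases hg : a ++ (a.take k).reverse = (a ++ (a.take k).reverse).reverse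
    · rw [if_pos hg, if_pos ((guard_eq_pal a k hk).mp hg), List.drop_left]
    · rw [if_neg hg, if_neg (fun h => hg ((guard_eq_pal a k hk).mpr h)), List.drop_left]
  | succ f ihf =>
    intro k hk
    rw [pvAppendLoop, pvScan]
    by_cases hg : a ++ (a.take k).reverse = (a ++ (a.take k).reverse).reverse
    · rw [if_pos hg, if_pos ((guard_eq_pal a k hk).mp hg), List.drop_left]
    · rw [if_neg hg, if_neg (fun h => hg ((guard_eq_pal a k hk).mpr h))]
      have hkn : k < a.length := by
        rcases Nat.lt_or_ge k a.length with h | h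
        · exact h
        · exfalso
          have hke : k = a.length := le_antisymm hk h
          subst hke
          apply hg
          rw [List.take_length, List.reverse_append, List.reverse_reverse]
      have hget : PySem.List.pyGet? (a ++ (a.take k).reverse) (k : Int) = some (a[k]'hkn) := by
        rw [PySem.List.pyGet?_natCast]
        rw [List.getElem?_append_left hkn]
        exact List.getElem?_eq_getElem hkn
      rw [hget]
      have hins : PySem.List.insert (a ++ (a.take k).reverse) ((a.length : Nat) : Int) (a[k]'hkn)
          = a ++ (a.take (k+1)).reverse := by
        rw [PySem.List.insert_natCast _ _ _ (by simp)]
        rw [List.take_left, List.drop_left]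
        congr 1
        rw [← List.take_append_getElem hkn, List.reverse_append]
        rfl
      show pvAppendLoop a.length f (PySem.List.insert (a ++ (a.take k).reverse) ((a.length : Nat) : Int) (a[k]'hkn)) ((k:Int) + 1) ((k:Int) + 1) = pvScan a a.length f (k + 1)
      rw [hins]
      have hc : (k : Int) + 1 = ((k + 1 : Nat) : Int) := by push_cast; ring
      rw [hc]
      exact ihf (k + 1) hkn

-- ===== VERDICT (by name: the statement is the Claim_ definition above) =====
theorem make_symmetric_spec : Claim_equal_make_symmetric := by
  intro arr _
  unfold Spec_make_symmetric make_symmetric make_symmetric_alt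
  have h := loop_eq arr arr.length 0 (Nat.zero_le _)
  simpa using h
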